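-- pv_equiv track=rewrite | github.com/Chen0523/Bomberman_Project | agent_code/my_agent/callbacks.py | find_plus
-- ===== SOURCE A (Python) =====
-- def find_plus(object_list, loc):
--
-- 	idx_r = 16
-- 	idx_l = 16
-- 	idx_u = 16
-- 	idx_d = 16
-- 	if len(object_list) != 0:
-- 		for obj in object_list:
--
-- 			diff_lr = obj[0] - loc[0]
-- 			if diff_lr < 0 and -diff_lr < idx_l:
-- 				idx_l = - diff_lr
--
-- 			if diff_lr > 0 and diff_lr < idx_r:
-- 				idx_r = diff_lr
--
-- 			diff_ud = obj[1] - loc[1]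
-- 			if diff_ud < 0 and -diff_ud < idx_u:
-- 				idx_u = -diff_ud
--
-- 			if diff_ud > 0 and diff_ud < idx_d:
-- 				idx_d = diff_ud
--
-- 	return idx_u, idx_r,idx_d,idx_l
-- ===== SOURCE B (Python) =====
-- def find_plus(object_list, loc):
--     # Sort each coordinate axis once, then binary-search the boundary around loc
--     # to read off the nearest larger / smaller coordinate directly.
--     def lower(arr, pred):
--         # first index i with pred(arr[i]) (pred monotone along the sorted arr)
--         lo, hi = 0, len(arr)
--         while lo < hi:
--             mid = (lo + hi) // 2
--             if pred(arr[mid]):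
--                 hi = mid
--             else:
--                 lo = mid + 1
--         return lo
--
--     def axis(arr, c):
--         n = len(arr)
--         i_gt = lower(arr, lambda a: a > c)
--         i_ge = lower(arr, lambda a: a >= c)
--         plus = min(arr[i_gt] - c, 16) if i_gt < n else 16
--         minus = min(c - arr[i_ge - 1], 16) if i_ge > 0 else 16
--         return plus, minus
--
--     xs = sorted(o[0] for o in object_list)
--     ys = sorted(o[1] for o in object_list)
--     idx_r, idx_l = axis(xs, loc[0])
--     idx_d, idx_u = axis(ys, loc[1])
--     return idx_u, idx_r, idx_d, idx_l
-- ===== Notes on version B (the rewrite author's own statement) =====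
-- stated objective: alternative
-- what changed: Replaces A's single accumulator pass over four mutable minima by sorting each coordinate axis once and binary-searching the boundary around loc, reading the nearest larger/smaller coordinate off the sorted array (capped at 16).
import Mathlib
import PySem

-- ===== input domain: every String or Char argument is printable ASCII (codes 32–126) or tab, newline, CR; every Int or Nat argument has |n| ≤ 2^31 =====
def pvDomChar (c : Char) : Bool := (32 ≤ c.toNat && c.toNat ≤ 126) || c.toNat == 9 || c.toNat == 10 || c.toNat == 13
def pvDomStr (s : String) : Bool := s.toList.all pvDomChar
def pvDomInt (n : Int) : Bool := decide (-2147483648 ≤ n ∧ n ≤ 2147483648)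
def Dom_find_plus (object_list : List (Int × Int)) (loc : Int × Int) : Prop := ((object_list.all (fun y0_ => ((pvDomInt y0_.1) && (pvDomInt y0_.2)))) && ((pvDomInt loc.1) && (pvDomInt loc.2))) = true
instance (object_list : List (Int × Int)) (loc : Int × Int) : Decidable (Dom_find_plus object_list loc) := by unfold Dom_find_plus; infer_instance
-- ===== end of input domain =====

-- B sorts each coordinate axis once and binary-searches the boundary around loc,
-- replacing A's single accumulator pass over four mutable minima (objective: alternative).

-- ===== PORT A =====
-- Literal port of A: one pass, state (idx_r, idx_l, idx_u, idx_d), each updated on strict improvement.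
def find_plus (object_list : List (Int × Int)) (loc : Int × Int) : Int × Int × Int × Int :=
  let s :=
    if object_list.length ≠ 0 then
      object_list.foldl (fun (s : Int × Int × Int × Int) obj =>
        let diff_lr := obj.1 - loc.1
        let idx_l := if diff_lr < 0 ∧ -diff_lr < s.2.1 then -diff_lr else s.2.1
        let idx_r := if diff_lr > 0 ∧ diff_lr < s.1 then diff_lr else s.1
        let diff_ud := obj.2 - loc.2
        let idx_u := if diff_ud < 0 ∧ -diff_ud < s.2.2.1 then -diff_ud else s.2.2.1
        let idx_d := if diff_ud > 0 ∧ diff_ud < s.2.2.2 then diff_ud else s.2.2.2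
        (idx_r, idx_l, idx_u, idx_d)) (16, 16, 16, 16)
    else (16, 16, 16, 16)
  (s.2.2.1, s.1, s.2.2.2, s.2.1)

-- ===== PORT B =====
-- Source B's `lower`: binary search for the first index whose element satisfies pred
-- (pred monotone along the sorted array); `while lo < hi` ported as recursion on hi - lo.
def pvLower (arr : List Int) (pred : Int → Bool) (lo hi : Nat) : Nat :=
  if _h : lo < hi then
    let mid := (lo + hi) / 2
    if pred (arr.getD mid 0) then pvLower arr pred lo mid
    else pvLower arr pred (mid + 1) hi
  else lo
termination_by hi - lo
decreasing_by all_goals omega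

-- Source B's `axis`: nearest strictly larger / strictly smaller coordinate via the two boundaries.
def pvAxis (arr : List Int) (c : Int) : Int × Int :=
  let n := arr.length
  let i_gt := pvLower arr (fun a => decide (a > c)) 0 n
  let i_ge := pvLower arr (fun a => decide (a ≥ c)) 0 n
  let plus := if i_gt < n then min (arr.getD i_gt 0 - c) 16 else 16
  let minus := if i_ge > 0 then min (c - arr.getD (i_ge - 1) 0) 16 else 16
  (plus, minus)

def find_plus_alt (object_list : List (Int × Int)) (loc : Int × Int) : Int × Int × Int × Int :=
  let xs := PySem.List.sorted (object_list.map (fun o => o.1)) (fun x => x) false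
  let ys := PySem.List.sorted (object_list.map (fun o => o.2)) (fun x => x) false
  let rl := pvAxis xs loc.1
  let du := pvAxis ys loc.2
  (du.2, rl.1, du.1, rl.2)

-- ===== PRECONDITION & SPEC =====
def Spec_find_plus (object_list : List (Int × Int)) (loc : Int × Int) (out : Int × Int × Int × Int) : Prop := out = find_plus_alt object_list loc
instance (object_list : List (Int × Int)) (loc : Int × Int) (out : Int × Int × Int × Int) : Decidable (Spec_find_plus object_list loc out) := by unfold Spec_find_plus; infer_instance

-- ===== CLAIM (what is proved, stated in full; the proofs are below) =====
def Claim_equal_find_plus : Prop := ∀ (object_list : List (Int × Int)) (loc : Int × Int), Dom_find_plus object_list loc → Spec_find_plus object_list loc (find_plus object_list loc)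

-- ===== LEMMAS AND PROOFS =====

-- One component of A's loop: a conditional strict-improvement fold equals foldl min over the filtered, mapped list.
theorem fold_comp (p : Int × Int → Prop) [DecidablePred p] (g : Int × Int → Int)
    (xs : List (Int × Int)) (a : Int) :
    xs.foldl (fun a x => if p x ∧ g x < a then g x else a) a
      = ((xs.filter (fun x => decide (p x))).map g).foldl min a := by
  induction xs generalizing a with
  | nil => rfl
  | cons x xs ih =>
    by_cases hp : p x
    · have hstep : (if g x < a then g x else a) = min a (g x) := by
        rw [min_def]; split_ifs <;> omega
      simp [List.foldl_cons, hp, hstep, ih]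
    · simp [List.foldl_cons, hp, ih]

-- A's combined fold computes the four component folds independently.
theorem fold_split (loc : Int × Int) (xs : List (Int × Int)) (r l u d : Int) :
    xs.foldl (fun (s : Int × Int × Int × Int) obj =>
        let diff_lr := obj.1 - loc.1
        let idx_l := if diff_lr < 0 ∧ -diff_lr < s.2.1 then -diff_lr else s.2.1
        let idx_r := if diff_lr > 0 ∧ diff_lr < s.1 then diff_lr else s.1
        let diff_ud := obj.2 - loc.2
        let idx_u := if diff_ud < 0 ∧ -diff_ud < s.2.2.1 then -diff_ud else s.2.2.1
        let idx_d := if diff_ud > 0 ∧ diff_ud < s.2.2.2 then diff_ud else s.2.2.2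
        (idx_r, idx_l, idx_u, idx_d)) (r, l, u, d)
    = (xs.foldl (fun a x => if x.1 - loc.1 > 0 ∧ x.1 - loc.1 < a then x.1 - loc.1 else a) r,
       xs.foldl (fun a x => if x.1 - loc.1 < 0 ∧ -(x.1 - loc.1) < a then -(x.1 - loc.1) else a) l,
       xs.foldl (fun a x => if x.2 - loc.2 < 0 ∧ -(x.2 - loc.2) < a then -(x.2 - loc.2) else a) u,
       xs.foldl (fun a x => if x.2 - loc.2 > 0 ∧ x.2 - loc.2 < a then x.2 - loc.2 else a) d) := by
  induction xs generalizing r l u d with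
  | nil => rfl
  | cons x xs ih =>
    simp only [List.foldl_cons]
    rw [ih]

-- pvLower finds the boundary index of a monotone predicate (invariant over the shrinking window).
theorem pvLower_spec_aux (arr : List Int) (pred : Int → Bool)
    (hmono : ∀ i j : Nat, i ≤ j → j < arr.length → pred (arr.getD i 0) = true → pred (arr.getD j 0) = true) :
    ∀ (k lo hi : Nat), hi - lo ≤ k → hi ≤ arr.length → lo ≤ arr.length →
    (∀ j : Nat, j < lo → pred (arr.getD j 0) = false) →
    (∀ j : Nat, hi ≤ j → j < arr.length → pred (arr.getD j 0) = true) →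
    (∀ j : Nat, j < pvLower arr pred lo hi → pred (arr.getD j 0) = false) ∧
    (∀ j : Nat, pvLower arr pred lo hi ≤ j → j < arr.length → pred (arr.getD j 0) = true) ∧
    pvLower arr pred lo hi ≤ arr.length := by
  intro k
  induction k with
  | zero =>
    intro lo hi hk hhi hlo hbelow habove
    rw [pvLower]
    have h : ¬ lo < hi := by omega
    simp only [dif_neg h]
    exact ⟨hbelow, fun j hj hjl => habove j (by omega) hjl, hlo⟩
  | succ k ih =>
    intro lo hi hk hhi hlo hbelow habove
    rw [pvLower]
    by_cases h : lo < hi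
    · simp only [dif_pos h]
      have hm1 : lo ≤ (lo + hi) / 2 := by omega
      have hm2 : (lo + hi) / 2 < hi := by omega
      by_cases hp : pred (arr.getD ((lo + hi) / 2) 0) = true
      · simp only [hp, if_true]
        exact ih lo ((lo + hi) / 2) (by omega) (by omega) hlo hbelow
          (fun j hj hjl => hmono ((lo + hi) / 2) j hj hjl hp)
      · simp only [hp]
        refine ih ((lo + hi) / 2 + 1) hi (by omega) hhi (by omega)
          (fun j hj => ?_) habove
        by_cases hpj : pred (arr.getD j 0) = true
        · exact absurd (hmono j ((lo + hi) / 2) (by omega) (by omega) hpj) hp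
        · exact eq_false_of_ne_true hpj
    · simp only [dif_neg h]
      exact ⟨hbelow, fun j hj hjl => habove j (by omega) hjl, hlo⟩

-- foldl min leaves the accumulator alone when it is a lower bound.
theorem foldl_min_of_le (l : List Int) (a : Int) (hle : ∀ x ∈ l, a ≤ x) :
    l.foldl min a = a := by
  induction l generalizing a with
  | nil => rfl
  | cons x t ih =>
    have hx : a ≤ x := hle x (by simp)
    simp only [List.foldl_cons, min_eq_left hx]
    exact ih a (fun y hy => hle y (by simp [hy]))

-- foldl min over a list where m is a member and a lower bound.
theorem foldl_min_of_mem_le (l : List Int) (m a : Int) (hm : m ∈ l) (hle : ∀ x ∈ l, m ≤ x) :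
    l.foldl min a = min a m := by
  induction l generalizing a with
  | nil => simp at hm
  | cons x t ih =>
    have hx : m ≤ x := hle x (by simp)
    simp only [List.foldl_cons]
    by_cases ht : m ∈ t
    · rw [ih (min a x) ht (fun y hy => hle y (by simp [hy]))]
      rw [min_assoc, min_eq_right hx]
    · have hmx : m = x := by rcases List.mem_cons.mp hm with h | h; exact h; exact absurd h ht
      subst hmx
      rw [foldl_min_of_le t (min a m) (fun y hy => le_trans (min_le_right a m) (hle y (by simp [hy])))]

-- foldl min is permutation-invariant.
theorem foldl_min_perm (l1 l2 : List Int) (a : Int) (h : l1.Perm l2) :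
    l1.foldl min a = l2.foldl min a := by
  haveI : RightCommutative (min : Int → Int → Int) :=
    ⟨fun b a₁ a₂ => by rw [min_assoc, min_comm a₁, ← min_assoc]⟩
  exact h.foldl_eq a

-- the sorted array is monotone under getD inside its length
theorem sorted_getD_mono (xs0 : List Int) (i j : Nat) (hij : i ≤ j)
    (hj : j < (PySem.List.sorted xs0 (fun x => x) false).length) :
    (PySem.List.sorted xs0 (fun x => x) false).getD i 0 ≤ (PySem.List.sorted xs0 (fun x => x) false).getD j 0 := by
  rw [List.getD_eq_getElem _ _ (lt_of_le_of_lt hij hj), List.getD_eq_getElem _ _ hj]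
  exact PySem.List.sorted_id_getElem_mono xs0 hij hj

-- Per-axis equivalence: B's sorted + binary-search read-off equals A's capped filtered minima.
theorem axis_eq (xs0 : List Int) (c : Int) :
    pvAxis (PySem.List.sorted xs0 (fun x => x) false) c
    = (((xs0.filter (fun a => decide (a - c > 0))).map (fun a => a - c)).foldl min 16,
       ((xs0.filter (fun a => decide (a - c < 0))).map (fun a => c - a)).foldl min 16) := by
  set arr := PySem.List.sorted xs0 (fun x => x) false with harr
  have hperm : arr.Perm xs0 := PySem.List.sorted_perm xs0 (fun x => x) false
  have hmono : ∀ i j : Nat, i ≤ j → j < arr.length → arr.getD i 0 ≤ arr.getD j 0 :=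
    fun i j hij hj => sorted_getD_mono xs0 i j hij hj
  -- boundary facts for the two predicates
  have hgt := pvLower_spec_aux arr (fun a => decide (a > c))
    (fun i j hij hj hp => by
      have := hmono i j hij hj
      simp only [decide_eq_true_eq] at hp ⊢; omega)
    arr.length 0 arr.length (by omega) le_rfl (by omega)
    (fun j hj => absurd hj (Nat.not_lt_zero j))
    (fun j hj hjl => absurd hjl (by omega))
  have hge := pvLower_spec_aux arr (fun a => decide (a ≥ c))
    (fun i j hij hj hp => by
      have := hmono i j hij hj
      simp only [decide_eq_true_eq] at hp ⊢; omega)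
    arr.length 0 arr.length (by omega) le_rfl (by omega)
    (fun j hj => absurd hj (Nat.not_lt_zero j))
    (fun j hj hjl => absurd hjl (by omega))
  obtain ⟨G1, G2, Gle⟩ := hgt
  obtain ⟨E1, E2, Ele⟩ := hge
  -- rewrite A-side predicates into the comparison form, and move the folds onto arr
  have hfgt : xs0.filter (fun a => decide (a - c > 0)) = xs0.filter (fun a => decide (a > c)) :=
    List.filter_congr (fun x _ => by simp only [decide_eq_decide]; omega)
  have hflt : xs0.filter (fun a => decide (a - c < 0)) = xs0.filter (fun a => decide (¬ a ≥ c)) :=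
    List.filter_congr (fun x _ => by simp only [decide_eq_decide]; omega)
  have hpermgt : ((arr.filter (fun a => decide (a > c))).map (fun a => a - c)).Perm
      ((xs0.filter (fun a => decide (a > c))).map (fun a => a - c)) :=
    (hperm.filter _).map _
  have hpermlt : ((arr.filter (fun a => decide (¬ a ≥ c))).map (fun a => c - a)).Perm
      ((xs0.filter (fun a => decide (¬ a ≥ c))).map (fun a => c - a)) :=
    (hperm.filter _).map _
  rw [hfgt, hflt, ← foldl_min_perm _ _ 16 hpermgt, ← foldl_min_perm _ _ 16 hpermlt]
  unfold pvAxis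
  refine Prod.ext ?_ ?_
  · -- plus direction
    simp only
    by_cases h1 : pvLower arr (fun a => decide (a > c)) 0 arr.length < arr.length
    · rw [if_pos h1]
      set r := pvLower arr (fun a => decide (a > c)) 0 arr.length with hr
      have hmem : arr.getD r 0 - c ∈ (arr.filter (fun a => decide (a > c))).map (fun a => a - c) := by
        refine List.mem_map.mpr ⟨arr.getD r 0, List.mem_filter.mpr ⟨?_, G2 r le_rfl h1⟩, rfl⟩
        rw [List.getD_eq_getElem _ _ h1]; exact List.getElem_mem h1
      have hlb : ∀ x ∈ (arr.filter (fun a => decide (a > c))).map (fun a => a - c),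
          arr.getD r 0 - c ≤ x := by
        intro x hx
        obtain ⟨a, ha, rfl⟩ := List.mem_map.mp hx
        obtain ⟨hamem, hap⟩ := List.mem_filter.mp ha
        obtain ⟨j, hj, rfl⟩ := List.mem_iff_getElem.mp hamem
        have hrj : r ≤ j := by
          by_contra hc
          have := G1 j (by omega)
          rw [List.getD_eq_getElem _ _ hj] at this
          simp only [decide_eq_false_iff_not, decide_eq_true_eq] at this hap
          omega
        have := hmono r j hrj hj
        rw [List.getD_eq_getElem _ _ hj] at this
        omega
      rw [foldl_min_of_mem_le _ _ 16 hmem hlb, min_comm]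
    · rw [if_neg h1]
      have hnil : arr.filter (fun a => decide (a > c)) = [] := by
        refine List.filter_eq_nil_iff.mpr (fun a ha => ?_)
        obtain ⟨j, hj, rfl⟩ := List.mem_iff_getElem.mp ha
        have := G1 j (by omega)
        rw [List.getD_eq_getElem _ _ hj] at this
        simpa using this
      rw [hnil]; rfl
  · -- minus direction
    simp only
    by_cases h2 : pvLower arr (fun a => decide (a ≥ c)) 0 arr.length > 0
    · rw [if_pos h2]
      set r := pvLower arr (fun a => decide (a ≥ c)) 0 arr.length with hr
      have hr1 : r - 1 < arr.length := by omega
      have hmem : c - arr.getD (r - 1) 0 ∈ (arr.filter (fun a => decide (¬ a ≥ c))).map (fun a => c - a) := by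
        refine List.mem_map.mpr ⟨arr.getD (r - 1) 0, List.mem_filter.mpr ⟨?_, ?_⟩, rfl⟩
        · rw [List.getD_eq_getElem _ _ hr1]; exact List.getElem_mem hr1
        · have := E1 (r - 1) (by omega)
          simp only [decide_eq_true_eq] at this ⊢
          simp only [decide_eq_false_iff_not] at this
          exact this
      have hlb : ∀ x ∈ (arr.filter (fun a => decide (¬ a ≥ c))).map (fun a => c - a),
          c - arr.getD (r - 1) 0 ≤ x := by
        intro x hx
        obtain ⟨a, ha, rfl⟩ := List.mem_map.mp hx
        obtain ⟨hamem, hap⟩ := List.mem_filter.mp ha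
        obtain ⟨j, hj, rfl⟩ := List.mem_iff_getElem.mp hamem
        have hjr : j < r := by
          by_contra hc
          have := E2 j (by omega) hj
          rw [List.getD_eq_getElem _ _ hj] at this
          simp only [decide_eq_true_eq] at this
          simp only [decide_eq_true_eq, not_le] at hap
          omega
        have := hmono j (r - 1) (by omega) hr1
        rw [List.getD_eq_getElem _ _ hj] at this
        omega
      rw [foldl_min_of_mem_le _ _ 16 hmem hlb, min_comm]
    · rw [if_neg h2]
      have hnil : arr.filter (fun a => decide (¬ a ≥ c)) = [] := by
        refine List.filter_eq_nil_iff.mpr (fun a ha => ?_)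
        obtain ⟨j, hj, rfl⟩ := List.mem_iff_getElem.mp ha
        have := E2 j (by omega) hj
        rw [List.getD_eq_getElem _ _ hj] at this
        simpa using this
      rw [hnil]; rfl

-- ===== VERDICT (by name: the statement is the Claim_ definition above) =====
theorem find_plus_spec : Claim_equal_find_plus := by
  intro object_list loc _
  unfold Spec_find_plus find_plus find_plus_alt
  by_cases hne : object_list.length ≠ 0
  · rw [if_pos hne, fold_split,
      fold_comp (fun x => x.1 - loc.1 > 0) (fun x => x.1 - loc.1),
      fold_comp (fun x => x.1 - loc.1 < 0) (fun x => -(x.1 - loc.1)),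
      fold_comp (fun x => x.2 - loc.2 < 0) (fun x => -(x.2 - loc.2)),
      fold_comp (fun x => x.2 - loc.2 > 0) (fun x => x.2 - loc.2)]
    dsimp only
    rw [axis_eq (object_list.map (fun o => o.1)) loc.1,
        axis_eq (object_list.map (fun o => o.2)) loc.2]
    simp only [List.filter_map, List.map_map, Function.comp_def, neg_sub]
  · have h0 : object_list = [] := List.length_eq_zero_iff.mp (by omega)
    subst h0
    simp [pvAxis, pvLower]
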